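-- pv_equiv track=rewrite | github.com/makeitr3al/trading-agent | utils/journal_table.py | _lifecycle_phase_from_entries
-- ===== SOURCE A (Python) =====
-- from typing import Any
--
-- def _lifecycle_phase_from_entries(group: list[dict[str, Any]]) -> str:
--     has_closed = any(e.get("entry_type") == "trade" and e.get("status") == "closed" for e in group)
--     if has_closed:
--         return "closed"
--     has_filled = any(e.get("entry_type") == "trade" and e.get("status") == "filled" for e in group)
--     if has_filled:
--         return "open"
--     has_order = any(e.get("entry_type") == "order" for e in group)
--     if has_order:
--         return "pending_order"
--     return "signal_only"
-- ===== SOURCE B (Python) =====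
-- def _lifecycle_phase_from_entries(group: list) -> str:
--     has_closed = has_filled = has_order = False
--     for e in group:
--         et = e.get("entry_type")
--         if et == "trade":
--             st = e.get("status")
--             if st == "closed":
--                 has_closed = True
--             elif st == "filled":
--                 has_filled = True
--         elif et == "order":
--             has_order = True
--     if has_closed:
--         return "closed"
--     if has_filled:
--         return "open"
--     if has_order:
--         return "pending_order"
--     return "signal_only"
-- ===== Notes on version B (the rewrite author's own statement) =====
-- stated objective: alternative
-- what changed: B replaces A's three separate any()-scans over the group with a single pass that accumulates three boolean flags (has_closed/has_filled/has_order) followed by one precedence decision.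
import Mathlib
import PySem

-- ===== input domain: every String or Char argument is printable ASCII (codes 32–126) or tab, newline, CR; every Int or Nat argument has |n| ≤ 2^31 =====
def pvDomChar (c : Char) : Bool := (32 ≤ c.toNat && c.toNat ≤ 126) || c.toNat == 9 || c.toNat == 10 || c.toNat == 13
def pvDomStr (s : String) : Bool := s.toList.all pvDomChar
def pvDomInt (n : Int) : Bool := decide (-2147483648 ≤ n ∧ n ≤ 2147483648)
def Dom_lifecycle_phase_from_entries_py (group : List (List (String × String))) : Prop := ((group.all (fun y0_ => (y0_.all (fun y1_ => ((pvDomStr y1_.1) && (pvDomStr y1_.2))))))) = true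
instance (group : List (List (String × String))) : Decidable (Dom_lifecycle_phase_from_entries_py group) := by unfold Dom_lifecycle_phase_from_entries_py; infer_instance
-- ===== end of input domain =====

-- ===== PORT A =====
-- B differs from A only in traversal strategy; header: B makes a single pass with three flags instead of A's three any() scans (alternative decomposition, same cost).
-- e.get(k) on the dict e (built from the association list, later duplicates overwriting)
def pvGet (e : List (String × String)) (k : String) : Option String :=
  (PySem.Dict.ofList e).get? k

def lifecycle_phase_from_entries_py (group : List (List (String × String))) : String :=
  let has_closed := group.any (fun e => (pvGet e "entry_type" == some "trade") && (pvGet e "status" == some "closed"))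
  if has_closed then "closed" else
  let has_filled := group.any (fun e => (pvGet e "entry_type" == some "trade") && (pvGet e "status" == some "filled"))
  if has_filled then "open" else
  let has_order := group.any (fun e => pvGet e "entry_type" == some "order")
  if has_order then "pending_order" else "signal_only"

-- ===== PORT B =====
-- one loop step of B: update the three flags from one entry, mirroring Source B's branch order
def pvStep (acc : Bool × Bool × Bool) (e : List (String × String)) : Bool × Bool × Bool :=
  let et := pvGet e "entry_type"
  if et == some "trade" then
    let st := pvGet e "status"
    if st == some "closed" then (true, acc.2.1, acc.2.2)
    else if st == some "filled" then (acc.1, true, acc.2.2)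
    else acc
  else if et == some "order" then (acc.1, acc.2.1, true)
  else acc

def lifecycle_phase_from_entries_py_alt (group : List (List (String × String))) : String :=
  let flags := group.foldl pvStep (false, false, false)
  if flags.1 then "closed"
  else if flags.2.1 then "open"
  else if flags.2.2 then "pending_order"
  else "signal_only"

-- ===== PRECONDITION & SPEC =====
def Spec_lifecycle_phase_from_entries_py (group : List (List (String × String))) (out : String) : Prop := out = lifecycle_phase_from_entries_py_alt group
instance (group : List (List (String × String))) (out : String) : Decidable (Spec_lifecycle_phase_from_entries_py group out) := by unfold Spec_lifecycle_phase_from_entries_py; infer_instance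

-- ===== CLAIM (what is proved, stated in full; the proofs are below) =====
def Claim_equal_lifecycle_phase_from_entries_py : Prop := ∀ (group : List (List (String × String))), Dom_lifecycle_phase_from_entries_py group → Spec_lifecycle_phase_from_entries_py group (lifecycle_phase_from_entries_py group)

-- ===== LEMMAS AND PROOFS =====
-- the three predicates A scans for
def pvPC (e : List (String × String)) : Bool :=
  (pvGet e "entry_type" == some "trade") && (pvGet e "status" == some "closed")
def pvPF (e : List (String × String)) : Bool :=
  (pvGet e "entry_type" == some "trade") && (pvGet e "status" == some "filled")
def pvPO (e : List (String × String)) : Bool :=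
  pvGet e "entry_type" == some "order"

-- one step of B ORs each flag with the corresponding predicate
theorem pvStep_eq (acc : Bool × Bool × Bool) (e : List (String × String)) :
    pvStep acc e = (acc.1 || pvPC e, acc.2.1 || pvPF e, acc.2.2 || pvPO e) := by
  unfold pvStep pvPC pvPF pvPO
  cases h1 : (pvGet e "entry_type" == some "trade") <;>
  cases h2 : (pvGet e "status" == some "closed") <;>
  cases h3 : (pvGet e "status" == some "filled") <;>
  cases h4 : (pvGet e "entry_type" == some "order") <;>
  simp_all [beq_iff_eq]

-- B's fold computes exactly the three any()-results of A
theorem pvFold_eq (group : List (List (String × String))) (acc : Bool × Bool × Bool) :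
    group.foldl pvStep acc = (acc.1 || group.any pvPC, acc.2.1 || group.any pvPF, acc.2.2 || group.any pvPO) := by
  induction group generalizing acc with
  | nil => simp
  | cons e rest ih =>
    simp only [List.foldl_cons, List.any_cons, pvStep_eq, ih]
    simp [Bool.or_assoc]

-- ===== VERDICT (by name: the statement is the Claim_ definition above) =====
theorem lifecycle_phase_from_entries_py_spec : Claim_equal_lifecycle_phase_from_entries_py := by
  intro group _
  unfold Spec_lifecycle_phase_from_entries_py lifecycle_phase_from_entries_py lifecycle_phase_from_entries_py_alt
  rw [pvFold_eq]
  simp only [Bool.false_or]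
  show _ = (if group.any pvPC then _ else if group.any pvPF then _ else if group.any pvPO then _ else _)
  unfold pvPC pvPF pvPO
  rfl
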